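-- pv_equiv track=rewrite | github.com/alanhakhyeonsong/AlgorithmSolv | codes/Programmers/Lv2/주식가격.py | solution_stack
-- ===== SOURCE A (Python) =====
-- def solution_stack(prices):
--     _len = len(prices)
--     answer = [i for i in range(_len-1, -1, -1)]
--
--     stack = [0]
--     for i in range(1, _len):
--         while stack and prices[i] < prices[stack[-1]]:
--             j = stack.pop()
--             answer[j] = i - j
--         stack.append(i)
--     return answer
-- ===== SOURCE B (Python) =====
-- def solution_stack(prices):
--     n = len(prices)
--     answer = [0] * n
--     for j in range(n):
--         c = 0
--         for i in range(j + 1, n):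
--             c += 1
--             if prices[i] < prices[j]:
--                 break
--         answer[j] = c
--     return answer
-- ===== Notes on version B (the rewrite author's own statement) =====
-- stated objective: simpler
-- what changed: Replaced the monotonic-stack single pass (stack of pending indices popped on a price drop) by the plain quadratic formulation: for each day scan forward, counting steps until the first strictly lower price.
import Mathlib
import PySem

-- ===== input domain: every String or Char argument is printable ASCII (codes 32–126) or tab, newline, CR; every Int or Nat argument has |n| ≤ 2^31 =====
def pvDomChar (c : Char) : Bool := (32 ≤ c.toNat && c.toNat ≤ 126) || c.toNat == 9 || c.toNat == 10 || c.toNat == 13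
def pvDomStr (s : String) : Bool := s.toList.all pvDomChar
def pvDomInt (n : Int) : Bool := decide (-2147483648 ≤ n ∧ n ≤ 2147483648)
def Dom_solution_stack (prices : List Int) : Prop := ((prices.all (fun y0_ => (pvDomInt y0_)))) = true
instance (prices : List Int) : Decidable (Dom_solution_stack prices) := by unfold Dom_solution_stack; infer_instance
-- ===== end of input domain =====

-- B replaces the monotonic-stack pass by the plain quadratic forward-scan formulation (simpler, not faster).
-- All list indexing in both ports is at Nat indices that are always in range, so List.getD is exact.

-- ===== PORT A =====
-- the inner 'while stack and prices[i] < prices[stack[-1]]' loop; the stack is held head-is-top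
def popLoop (prices : List Int) (i : Nat) : List Nat → List Int → List Int × List Nat
  | [], ans => (ans, [])
  | j :: st, ans =>
      if prices.getD i 0 < prices.getD j 0 then
        popLoop prices i st (ans.set j ((i : Int) - (j : Int)))
      else (ans, j :: st)

-- one iteration of the 'for i in range(1, _len)' body
def stepA (prices : List Int) (s : List Int × List Nat) (i : Nat) : List Int × List Nat :=
  let r := popLoop prices i s.2 s.1
  (r.1, i :: r.2)

def solution_stack (prices : List Int) : List Int :=
  let n := prices.length
  let answer := PySem.List.pyRange ((n : Int) - 1) (-1) (-1)
  ((List.range' 1 (n - 1)).foldl (stepA prices) (answer, [0])).1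

-- ===== PORT B =====
-- the inner 'for i in range(j+1, n): c += 1; if prices[i] < prices[j]: break' loop
def scanB (prices : List Int) (pj : Int) (c : Int) : List Nat → Int
  | [] => c
  | k :: rest =>
      if prices.getD k 0 < pj then c + 1 else scanB prices pj (c + 1) rest

def solution_stack_alt (prices : List Int) : List Int :=
  let n := prices.length
  (List.range n).map (fun j => scanB prices (prices.getD j 0) 0 (List.range' (j + 1) (n - (j + 1))))

-- ===== PRECONDITION & SPEC =====
def Spec_solution_stack (prices : List Int) (out : List Int) : Prop := out = solution_stack_alt prices
instance (prices : List Int) (out : List Int) : Decidable (Spec_solution_stack prices out) := by unfold Spec_solution_stack; infer_instance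

-- ===== CLAIM (what is proved, stated in full; the proofs are below) =====
def Claim_equal_solution_stack : Prop := ∀ (prices : List Int), Dom_solution_stack prices → Spec_solution_stack prices (solution_stack prices)

-- ===== LEMMAS AND PROOFS =====

lemma scanB_cons (prices : List Int) (pj c : Int) (k : Nat) (rest : List Nat) :
    scanB prices pj c (k :: rest) =
      if prices.getD k 0 < pj then c + 1 else scanB prices pj (c + 1) rest := rfl

lemma popLoop_cons (prices : List Int) (i j : Nat) (st : List Nat) (ans : List Int) :
    popLoop prices i (j :: st) ans =
      if prices.getD i 0 < prices.getD j 0 then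
        popLoop prices i st (ans.set j ((i : Int) - (j : Int)))
      else (ans, j :: st) := rfl

-- first index k in (j, m] with prices[k] < prices[j], if any (proof-side characterisation)
def fd (prices : List Int) (j m : Nat) : Option Nat :=
  (List.range' (j + 1) (m - j)).find? (fun k => prices.getD k 0 < prices.getD j 0)

-- the value answer[j] holds after the outer loop has processed indices 1..m
def ansVal (prices : List Int) (m j : Nat) : Int :=
  match fd prices j m with
  | some k => (k : Int) - (j : Int)
  | none => (prices.length : Int) - 1 - (j : Int)

def ansList (prices : List Int) (m : Nat) : List Int :=
  (List.range prices.length).map (ansVal prices m)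

-- the stack contents after the outer loop has processed indices 1..m (head is top)
def stk (prices : List Int) (m : Nat) : List Nat :=
  ((List.range (m + 1)).filter (fun j => (fd prices j m).isNone)).reverse

lemma ansList_zero (prices : List Int) :
    PySem.List.pyRange ((prices.length : Int) - 1) (-1) (-1) = ansList prices 0 := by
  rw [PySem.List.pyRange_neg_one]
  have h1 : (((prices.length : Int) - 1) - (-1)).toNat = prices.length := by omega
  rw [h1]
  unfold ansList
  refine List.map_congr_left ?_
  intro j hj
  simp [ansVal, fd]

lemma scanB_spec (prices : List Int) (pj : Int) :
    ∀ (len s : Nat) (c : Int), scanB prices pj c (List.range' s len) =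
      match (List.range' s len).find? (fun k => prices.getD k 0 < pj) with
      | some k => c + ((k : Int) - (s : Int)) + 1
      | none => c + (len : Int) := by
  intro len
  induction len with
  | zero => intro s c; simp [scanB]
  | succ len ih =>
    intro s c
    rw [List.range'_succ, scanB_cons]
    by_cases h : prices.getD s 0 < pj
    · rw [if_pos h, List.find?_cons_of_pos (by simpa using h)]
      simp only
      ring
    · rw [if_neg h, ih (s + 1) (c + 1), List.find?_cons_of_neg (by simpa using h)]
      rcases hf : (List.range' (s + 1) len).find? (fun k => decide (prices.getD k 0 < pj)) with _ | k
      · simp only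
        push_cast
        ring
      · simp only
        push_cast
        ring

lemma alt_eq_ansList (prices : List Int) :
    solution_stack_alt prices = ansList prices (prices.length - 1) := by
  unfold solution_stack_alt ansList
  refine List.map_congr_left ?_
  intro j hj
  rw [List.mem_range] at hj
  rw [scanB_spec]
  unfold ansVal fd
  rw [show prices.length - 1 - j = prices.length - (j + 1) by omega]
  rcases hf : (List.range' (j + 1) (prices.length - (j + 1))).find?
      (fun k => decide (prices.getD k 0 < prices.getD j 0)) with _ | k
  · simp only
    have h2 : ((prices.length - (j + 1) : Nat) : Int) = (prices.length : Int) - 1 - (j : Int) := by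
      omega
    rw [h2]
    ring
  · simp only
    push_cast
    ring

lemma popLoop_eq (prices : List Int) (i : Nat) :
    ∀ (st : List Nat) (ans : List Int),
      popLoop prices i st ans =
        ((st.takeWhile (fun j => prices.getD i 0 < prices.getD j 0)).foldl
            (fun a j => a.set j ((i : Int) - (j : Int))) ans,
         st.dropWhile (fun j => prices.getD i 0 < prices.getD j 0)) := by
  intro st
  induction st with
  | nil => intro ans; simp [popLoop]
  | cons j st ih =>
    intro ans
    rw [popLoop_cons, List.takeWhile_cons, List.dropWhile_cons]
    by_cases h : prices.getD i 0 < prices.getD j 0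
    · rw [if_pos h, if_pos (by simpa using h), if_pos (by simpa using h), ih]
      rfl
    · rw [if_neg h, if_neg (by simpa using h), if_neg (by simpa using h)]
      rfl

lemma filter_not_eq_dropWhile {α : Type} (q : α → Bool) :
    ∀ (l : List α), l.Pairwise (fun a b => q b = true → q a = true) →
      l.filter (fun x => !q x) = l.dropWhile q := by
  intro l
  induction l with
  | nil => intro _; rfl
  | cons x xs ih =>
    intro hpw
    rw [List.pairwise_cons] at hpw
    by_cases hx : q x = true
    · simp [hx, ih hpw.2]
    · have hx' : q x = false := by simpa using hx
      have hall : List.filter (fun x => !q x) xs = xs := by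
        rw [List.filter_eq_self]
        intro a ha
        simp only [Bool.not_eq_true']
        by_cases hq : q a = true
        · exact absurd (hpw.1 a ha hq) (by simp [hx'])
        · simpa using hq
      simp [hx', hall]

lemma filter_eq_takeWhile {α : Type} (q : α → Bool) :
    ∀ (l : List α), l.Pairwise (fun a b => q b = true → q a = true) →
      l.filter q = l.takeWhile q := by
  intro l
  induction l with
  | nil => intro _; rfl
  | cons x xs ih =>
    intro hpw
    rw [List.pairwise_cons] at hpw
    by_cases hx : q x = true
    · simp [hx, ih hpw.2]
    · have hx' : q x = false := by simpa using hx
      have hall : List.filter q xs = [] := by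
        rw [List.filter_eq_nil_iff]
        intro a ha hq
        exact absurd (hpw.1 a ha hq) (by simp [hx'])
      simp [hx', hall]

lemma mem_stk (prices : List Int) (m j : Nat) :
    j ∈ stk prices m ↔ j ≤ m ∧ fd prices j m = none := by
  simp only [stk, List.mem_reverse, List.mem_filter, List.mem_range, Option.isNone_iff_eq_none]
  exact ⟨fun h => ⟨by omega, h.2⟩, fun h => ⟨by omega, h.2⟩⟩


lemma stk_pairwise (prices : List Int) (m : Nat) (i : Nat) :
    (stk prices m).Pairwise (fun a b =>
      decide (prices.getD i 0 < prices.getD b 0) = true →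
        decide (prices.getD i 0 < prices.getD a 0) = true) := by
  have h0 : (List.range (m + 1)).Pairwise (· < ·) := List.pairwise_lt_range
  have h1 : ((List.range (m + 1)).filter (fun j => (fd prices j m).isNone)).Pairwise (· < ·) :=
    List.Pairwise.sublist List.filter_sublist h0
  unfold stk
  rw [List.pairwise_reverse]
  refine h1.imp_of_mem ?_
  intro a b ha hb hab hq
  have ha' : a ≤ m ∧ fd prices a m = none := by
    have := (mem_stk prices m a).mp (by simpa [stk, List.mem_reverse] using ha)
    exact this
  have hb' : b ≤ m ∧ fd prices b m = none := by
    have := (mem_stk prices m b).mp (by simpa [stk, List.mem_reverse] using hb)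
    exact this
  -- a < b, a survives through m, so prices[a] ≤ prices[b]
  have hmem : b ∈ List.range' (a + 1) (m - a) := by
    rw [List.mem_range'_1]
    omega
  have hnone := List.find?_eq_none.mp ha'.2 b hmem
  have hab' : prices.getD a 0 ≤ prices.getD b 0 := by
    by_contra hc
    exact hnone (by simpa using not_le.mp hc)
  have hq' : prices.getD i 0 < prices.getD a 0 := by simpa using hq
  simpa using lt_of_lt_of_le hq' hab'

lemma foldl_set_length (f : Nat → Int) :
    ∀ (l : List Nat) (ans : List Int),
      (l.foldl (fun a x => a.set x (f x)) ans).length = ans.length := by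
  intro l
  induction l with
  | nil => intro ans; rfl
  | cons x xs ih =>
    intro ans
    simp only [List.foldl_cons]
    rw [ih, List.length_set]

lemma foldl_set_getD (f : Nat → Int) :
    ∀ (l : List Nat) (ans : List Int), l.Nodup → (∀ x ∈ l, x < ans.length) →
      ∀ j, (l.foldl (fun a x => a.set x (f x)) ans).getD j 0 =
        if j ∈ l then f j else ans.getD j 0 := by
  intro l
  induction l with
  | nil => intro ans _ _ j; simp
  | cons x xs ih =>
    intro ans hnd hlt j
    rw [List.nodup_cons] at hnd
    simp only [List.foldl_cons]
    rw [ih _ hnd.2 (fun y hy => by rw [List.length_set]; exact hlt y (List.mem_cons_of_mem _ hy))]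
    by_cases hjx : j ∈ xs
    · simp [hjx]
    · have hx : x < ans.length := hlt x List.mem_cons_self
      by_cases hje : j = x
      · subst hje
        simp [hjx, List.getD_eq_getElem?_getD, hx]
      · simp only [hjx, if_false, List.mem_cons]
        rw [if_neg (by tauto)]
        simp [List.getD_eq_getElem?_getD, Ne.symm hje]

lemma fd_succ (prices : List Int) (j m : Nat) (h : j ≤ m) :
    fd prices j (m + 1) =
      (fd prices j m).or
        (if prices.getD (m + 1) 0 < prices.getD j 0 then some (m + 1) else none) := by
  unfold fd
  have h1 : m + 1 - j = (m - j) + 1 := by omega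
  rw [h1, List.range'_concat, show j + 1 + 1 * (m - j) = m + 1 by omega, List.find?_append]
  congr 1
  by_cases hc : prices.getD (m + 1) 0 < prices.getD j 0
  · rw [List.find?_cons_of_pos (by simpa using hc), if_pos hc]
  · rw [List.find?_cons_of_neg (by simpa using hc), if_neg hc]
    rfl

lemma fd_high (prices : List Int) (j m : Nat) (h : m ≤ j) : fd prices j m = none := by
  unfold fd
  rw [Nat.sub_eq_zero_of_le h]
  rfl

lemma stepA_eq (prices : List Int) (m : Nat) (h : m + 1 ≤ prices.length - 1) :
    stepA prices (ansList prices m, stk prices m) (m + 1) =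
      (ansList prices (m + 1), stk prices (m + 1)) := by
  have hn : m + 1 < prices.length := by omega
  have hpw := stk_pairwise prices m (m + 1)
  unfold stepA
  rw [popLoop_eq]
  simp only [Prod.mk.injEq]
  constructor
  · -- answer component
    rw [← filter_eq_takeWhile _ _ hpw]
    have hnd : ((stk prices m).filter
        (fun j => decide (prices.getD (m + 1) 0 < prices.getD j 0))).Nodup :=
      ((List.nodup_reverse.mpr ((List.nodup_range).filter _)).filter _)
    have hlen : (ansList prices m).length = prices.length := by
      simp [ansList]
    have hsub : ∀ x ∈ (stk prices m).filter
        (fun j => decide (prices.getD (m + 1) 0 < prices.getD j 0)),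
        x < (ansList prices m).length := by
      intro x hx
      have hx' := ((mem_stk prices m x).mp (List.mem_filter.mp hx).1).1
      omega
    refine List.ext_getElem ?_ ?_
    · rw [foldl_set_length, hlen]
      simp [ansList]
    · intro j h1 h2
      have hj : j < prices.length := by
        rw [foldl_set_length, hlen] at h1
        exact h1
      rw [← List.getD_eq_getElem _ 0 h1, ← List.getD_eq_getElem _ 0 h2,
        foldl_set_getD (fun x => ((m + 1 : Nat) : Int) - (x : Int)) _ _ hnd hsub j]
      have hR : (ansList prices (m + 1)).getD j 0 = ansVal prices (m + 1) j := by
        rw [List.getD_eq_getElem _ 0 (by simpa [ansList] using hj)]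
        simp [ansList]
      have hL : (ansList prices m).getD j 0 = ansVal prices m j := by
        rw [List.getD_eq_getElem _ 0 (by simpa [ansList] using hj)]
        simp [ansList]
      rw [hR]
      by_cases hjl : j ∈ (stk prices m).filter
          (fun j => decide (prices.getD (m + 1) 0 < prices.getD j 0))
      · rw [if_pos hjl]
        obtain ⟨hjs, hq⟩ := List.mem_filter.mp hjl
        obtain ⟨hjm, hfd⟩ := (mem_stk prices m j).mp hjs
        have hc : prices.getD (m + 1) 0 < prices.getD j 0 := by simpa using hq
        unfold ansVal
        rw [fd_succ _ _ _ hjm, hfd, if_pos hc]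
        rfl
      · rw [if_neg hjl, hL]
        unfold ansVal
        by_cases hjm : j ≤ m
        · rw [fd_succ _ _ _ hjm]
          rcases hfd : fd prices j m with _ | k
          · have hjs : j ∈ stk prices m := (mem_stk prices m j).mpr ⟨hjm, hfd⟩
            have hq : ¬ prices.getD (m + 1) 0 < prices.getD j 0 := by
              intro hc
              exact hjl (List.mem_filter.mpr ⟨hjs, by simpa using hc⟩)
            rw [if_neg hq]
            rfl
          · rfl
        · rw [fd_high _ _ _ (by omega), fd_high _ _ _ (by omega)]
  · -- stack component
    rw [← filter_not_eq_dropWhile _ _ hpw]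
    have hg : (fd prices (m + 1) (m + 1)).isNone = true := by
      rw [fd_high _ _ _ le_rfl]
      rfl
    conv_rhs => rw [stk, List.range_succ, List.filter_append]
    rw [show (List.filter (fun j => (fd prices j (m + 1)).isNone) [m + 1]) = [m + 1] by
      simp [hg]]
    rw [List.reverse_append, List.reverse_singleton, List.singleton_append]
    congr 1
    rw [stk, List.filter_reverse, List.filter_filter]
    congr 1
    refine List.filter_congr ?_
    intro a ha
    have ham : a ≤ m := by
      have := List.mem_range.mp ha
      omega
    rw [fd_succ _ _ _ ham]
    rcases hfd : fd prices a m with _ | k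
    · by_cases hc : prices.getD (m + 1) 0 < prices.getD a 0
      all_goals simp only [List.getD_eq_getElem?_getD] at hc
      · simp [hc]
      · simp [hc]
    · simp

lemma fold_eq (prices : List Int) :
    ∀ (m : Nat), m ≤ prices.length - 1 →
      (List.range' 1 m).foldl (stepA prices) (ansList prices 0, stk prices 0) =
        (ansList prices m, stk prices m) := by
  intro m
  induction m with
  | zero => intro _; rfl
  | succ m ih =>
    intro h
    rw [List.range'_concat, show 1 + 1 * m = m + 1 by omega, List.foldl_append,
      ih (by omega), List.foldl_cons, List.foldl_nil, stepA_eq prices m h]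

lemma stk_zero (prices : List Int) : stk prices 0 = [0] := by
  simp [stk, List.range_one, fd]

-- ===== VERDICT (by name: the statement is the Claim_ definition above) =====
theorem solution_stack_spec : Claim_equal_solution_stack := by
  intro prices _
  unfold Spec_solution_stack
  show ((List.range' 1 (prices.length - 1)).foldl (stepA prices)
      (PySem.List.pyRange ((prices.length : Int) - 1) (-1) (-1), [0])).1 = _
  rw [ansList_zero, ← stk_zero, fold_eq prices (prices.length - 1) le_rfl, alt_eq_ansList]
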